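-- pv_equiv track=rewrite | github.com/dotdaiya/GolayEncoderDecoder | app.py | bininput
-- ===== SOURCE A (Python) =====
-- def bininput(input_string):
--     for character in input_string:
--         if character == '0':
--             continue
--         elif character == '1':
--             continue
--         else:
--             return False
--     return True
-- ===== SOURCE B (Python) =====
-- def bininput(input_string):
--     # A string is all-binary iff stripping '0'/'1' from both ends leaves nothing:
--     # any non-binary character stops the trimming and survives.
--     return input_string.strip('01') == ''
-- ===== Notes on version B (the rewrite author's own statement) =====
-- stated objective: idiomatic
-- what changed: Replaces A's forward per-character branch/early-return loop with str.strip('01'): trim binary digits from both ends and test the remainder for emptiness, which is empty exactly when every character is '0' or '1'.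
import Mathlib
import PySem

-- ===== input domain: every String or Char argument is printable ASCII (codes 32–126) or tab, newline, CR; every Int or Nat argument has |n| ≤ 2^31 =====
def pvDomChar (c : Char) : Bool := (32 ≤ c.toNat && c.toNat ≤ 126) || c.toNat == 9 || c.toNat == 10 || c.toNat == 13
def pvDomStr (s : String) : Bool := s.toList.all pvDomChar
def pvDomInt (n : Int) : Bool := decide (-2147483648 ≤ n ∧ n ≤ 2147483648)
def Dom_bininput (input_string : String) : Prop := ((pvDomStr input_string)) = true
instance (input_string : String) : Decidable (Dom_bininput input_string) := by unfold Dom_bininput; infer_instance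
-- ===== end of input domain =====

-- B replaces A's forward branch/early-return scan with str.strip('01') == '': trim binary
-- digits from both ends and test emptiness (idiomatic; same True/False on every string).

-- ===== PORT A =====
-- A's loop with early return, as structural recursion over the characters
def bininputLoop (cs : List Char) : Bool :=
  match cs with
  | [] => true
  | c :: rest =>
    if c = '0' then bininputLoop rest
    else if c = '1' then bininputLoop rest
    else false

def bininput (input_string : String) : Bool := bininputLoop input_string.toList

-- ===== PORT B =====
def bininput_alt (input_string : String) : Bool :=
  PySem.Str.stripChars input_string "01" == ""

-- ===== PRECONDITION & SPEC =====
def Spec_bininput (input_string : String) (out : Bool) : Prop := out = bininput_alt input_string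
instance (input_string : String) (out : Bool) : Decidable (Spec_bininput input_string out) := by unfold Spec_bininput; infer_instance

-- ===== CLAIM =====
def Claim_equal_bininput : Prop := ∀ (input_string : String), Dom_bininput input_string → Spec_bininput input_string (bininput input_string)

-- ===== LEMMAS AND PROOFS =====
lemma bininputLoop_iff (cs : List Char) :
    bininputLoop cs = true ↔ ∀ c ∈ cs, c = '0' ∨ c = '1' := by
  induction cs with
  | nil => simp [bininputLoop]
  | cons c rest ih =>
    simp only [bininputLoop]
    by_cases h0 : c = '0'
    · simp [h0, ih]
    · by_cases h1 : c = '1'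
      · simp [h1, ih]
      · simp [h0, h1]

-- both-ends trimming leaves nothing iff every character passes the test
lemma strip_nil (p : Char → Bool) (s : List Char) :
    ((List.dropWhile p (List.dropWhile p s).reverse).reverse = []) ↔ ∀ c ∈ s, p c = true := by
  rw [List.reverse_eq_nil_iff, List.dropWhile_eq_nil_iff]
  simp only [List.mem_reverse]
  constructor
  · intro h c hc
    rcases List.mem_append.mp (by rw [List.takeWhile_append_dropWhile] at *; exact hc :
        c ∈ s.takeWhile p ++ s.dropWhile p) with h' | h'
    · exact List.mem_takeWhile_imp h'
    · exact h c h'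
  · intro h c hc
    exact h c (List.dropWhile_sublist p |>.mem hc)

lemma bininput_alt_iff (s : String) :
    bininput_alt s = true ↔ ∀ c ∈ s.toList, c = '0' ∨ c = '1' := by
  rw [bininput_alt, beq_iff_eq, ← String.toList_inj, PySem.Str.toList_stripChars]
  simp only [String.toList_empty]
  rw [PySem.Chars.stripChars, strip_nil]
  constructor <;> intro h c hc <;> have := h c hc <;> revert this <;> simp

-- ===== VERDICT =====
theorem bininput_spec : Claim_equal_bininput := by
  intro s _
  unfold Spec_bininput
  cases hA : bininput s with
  | true =>
    exact ((bininput_alt_iff s).2 ((bininputLoop_iff s.toList).1 hA)).symm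
  | false =>
    cases hB : bininput_alt s with
    | false => rfl
    | true =>
      have : bininput s = true := (bininputLoop_iff s.toList).2 ((bininput_alt_iff s).1 hB)
      rw [hA] at this; exact absurd this (by simp)
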